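-- pv_equiv track=rewrite | github.com/AmanPathan24/Project_SmartFouling | High_End_WebApp/backend/image_classification_api.py | _categorize_classification
-- ===== SOURCE A (Python) =====
-- def _categorize_classification(label: str, is_marine_related: bool) -> str:
--     """Categorize classification results"""
--     label_lower = label.lower()
--
--     if is_marine_related:
--         if any(word in label_lower for word in ['barnacle', 'crustacean', 'shell']):
--             return "Barnacles/Crustaceans"
--         elif any(word in label_lower for word in ['algae', 'seaweed', 'moss']):
--             return "Algae/Seaweed"
--         elif any(word in label_lower for word in ['coral', 'sponge']):
--             return "Corals/Sponges"
--         elif any(word in label_lower for word in ['rust', 'corrosion', 'metal']):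
--             return "Corrosion/Rust"
--         elif any(word in label_lower for word in ['boat', 'ship', 'hull']):
--             return "Marine Vessel"
--         else:
--             return "Marine Life"
--     else:
--         return "General Classification"
-- ===== SOURCE B (Python) =====
-- # B: flat keyword->priority map; take the minimum matched rank and index a category array,
-- # instead of A's ordered if/elif cascade with early returns.
-- _KEYWORD_RANK = {
--     'barnacle': 0, 'crustacean': 0, 'shell': 0,
--     'algae': 1, 'seaweed': 1, 'moss': 1,
--     'coral': 2, 'sponge': 2,
--     'rust': 3, 'corrosion': 3, 'metal': 3,
--     'boat': 4, 'ship': 4, 'hull': 4,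
-- }
-- _CATEGORIES = ["Barnacles/Crustaceans", "Algae/Seaweed", "Corals/Sponges",
--                "Corrosion/Rust", "Marine Vessel", "Marine Life"]
--
-- def _categorize_classification(label: str, is_marine_related: bool) -> str:
--     if not is_marine_related:
--         return "General Classification"
--     lower = label.lower()
--     rank = min((r for kw, r in _KEYWORD_RANK.items() if kw in lower),
--                default=len(_CATEGORIES) - 1)
--     return _CATEGORIES[rank]
-- ===== Notes on version B (the rewrite author's own statement) =====
-- stated objective: alternative
-- what changed: Replaces the ordered early-return if/elif cascade with a flat keyword-to-priority map: all keyword hits are collected, the minimum matched rank is taken, and it indexes a category array (correct because min rank equals the first group the cascade would hit).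
import Mathlib
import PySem

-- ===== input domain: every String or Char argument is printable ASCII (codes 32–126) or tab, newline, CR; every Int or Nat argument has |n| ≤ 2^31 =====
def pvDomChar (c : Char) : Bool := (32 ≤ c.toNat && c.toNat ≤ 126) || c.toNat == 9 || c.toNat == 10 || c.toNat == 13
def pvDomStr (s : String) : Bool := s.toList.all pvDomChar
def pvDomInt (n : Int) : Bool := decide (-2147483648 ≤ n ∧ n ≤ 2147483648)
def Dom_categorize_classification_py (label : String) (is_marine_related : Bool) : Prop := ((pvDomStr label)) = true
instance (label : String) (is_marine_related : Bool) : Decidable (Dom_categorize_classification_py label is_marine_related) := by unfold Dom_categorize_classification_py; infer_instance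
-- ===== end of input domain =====

-- B replaces A's ordered early-return if/elif cascade by a flat keyword→priority map:
-- the minimum matched rank indexes a category array (alternative decomposition; same cost).

-- ===== PORT A =====
def categorize_classification_py (label : String) (is_marine_related : Bool) : String :=
  let label_lower := PySem.Str.lower label
  if is_marine_related then
    if (["barnacle", "crustacean", "shell"].any (fun word => PySem.Str.isIn word label_lower)) then
      "Barnacles/Crustaceans"
    else if (["algae", "seaweed", "moss"].any (fun word => PySem.Str.isIn word label_lower)) then
      "Algae/Seaweed"
    else if (["coral", "sponge"].any (fun word => PySem.Str.isIn word label_lower)) then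
      "Corals/Sponges"
    else if (["rust", "corrosion", "metal"].any (fun word => PySem.Str.isIn word label_lower)) then
      "Corrosion/Rust"
    else if (["boat", "ship", "hull"].any (fun word => PySem.Str.isIn word label_lower)) then
      "Marine Vessel"
    else
      "Marine Life"
  else
    "General Classification"

-- ===== PORT B =====
-- flat keyword → priority rank map (a Python dict of string keys; insertion order as listed)
def pvKeywordRank : List (String × Nat) :=
  [("barnacle", 0), ("crustacean", 0), ("shell", 0),
   ("algae", 1), ("seaweed", 1), ("moss", 1),
   ("coral", 2), ("sponge", 2),
   ("rust", 3), ("corrosion", 3), ("metal", 3),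
   ("boat", 4), ("ship", 4), ("hull", 4)]

def pvCategories : List String :=
  ["Barnacles/Crustaceans", "Algae/Seaweed", "Corals/Sponges",
   "Corrosion/Rust", "Marine Vessel", "Marine Life"]

def categorize_classification_py_alt (label : String) (is_marine_related : Bool) : String :=
  if !is_marine_related then "General Classification"
  else
    let lower := PySem.Str.lower label
    -- min over the matched ranks, default = len(_CATEGORIES) - 1, as a fold
    let rank := pvKeywordRank.foldl
      (fun acc p => if PySem.Str.isIn p.1 lower then min acc p.2 else acc)
      (pvCategories.length - 1)
    pvCategories.getD rank "Marine Life"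

-- ===== PRECONDITION & SPEC =====
def Spec_categorize_classification_py (label : String) (is_marine_related : Bool) (out : String) : Prop := out = categorize_classification_py_alt label is_marine_related
instance (label : String) (is_marine_related : Bool) (out : String) : Decidable (Spec_categorize_classification_py label is_marine_related out) := by unfold Spec_categorize_classification_py; infer_instance

-- ===== CLAIM (what is proved, stated in full; the proofs are below) =====
def Claim_equal_categorize_classification_py : Prop := ∀ (label : String) (is_marine_related : Bool), Dom_categorize_classification_py label is_marine_related → Spec_categorize_classification_py label is_marine_related (categorize_classification_py label is_marine_related)

-- ===== LEMMAS AND PROOFS =====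

-- folding one keyword group (all keywords with the same rank r) updates the accumulator
-- exactly when some keyword matches
theorem pv_group_fold (p : String → Bool) (ks : List String) (r a : Nat) :
    (ks.map (fun k => (k, r))).foldl
      (fun acc q => if p q.1 then min acc q.2 else acc) a
    = if ks.any p then min a r else a := by
  induction ks generalizing a with
  | nil => simp
  | cons k ks ih =>
      simp only [List.map, List.foldl, List.any, ih]
      by_cases hk : p k = true <;> by_cases hks : ks.any p = true <;>
        simp [hk, hks]

theorem pv_table_split : pvKeywordRank =
    (["barnacle", "crustacean", "shell"].map (fun k => (k, 0)))
    ++ (["algae", "seaweed", "moss"].map (fun k => (k, 1)))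
    ++ (["coral", "sponge"].map (fun k => (k, 2)))
    ++ (["rust", "corrosion", "metal"].map (fun k => (k, 3)))
    ++ (["boat", "ship", "hull"].map (fun k => (k, 4))) := rfl

-- ===== VERDICT (by name: the statement is the Claim_ definition above) =====
theorem categorize_classification_py_spec : Claim_equal_categorize_classification_py := by
  intro label is_marine_related _
  unfold Spec_categorize_classification_py
  cases is_marine_related
  · simp [categorize_classification_py, categorize_classification_py_alt]
  · simp only [categorize_classification_py, categorize_classification_py_alt,
      Bool.not_true, if_true, Bool.false_eq_true, if_false,
      pv_table_split, List.foldl_append]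
    rw [pv_group_fold (fun k => PySem.Str.isIn k (PySem.Str.lower label)),
      pv_group_fold (fun k => PySem.Str.isIn k (PySem.Str.lower label)),
      pv_group_fold (fun k => PySem.Str.isIn k (PySem.Str.lower label)),
      pv_group_fold (fun k => PySem.Str.isIn k (PySem.Str.lower label)),
      pv_group_fold (fun k => PySem.Str.isIn k (PySem.Str.lower label))]
    generalize ["barnacle", "crustacean", "shell"].any
        (fun k => PySem.Str.isIn k (PySem.Str.lower label)) = g1
    generalize ["algae", "seaweed", "moss"].any
        (fun k => PySem.Str.isIn k (PySem.Str.lower label)) = g2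
    generalize ["coral", "sponge"].any
        (fun k => PySem.Str.isIn k (PySem.Str.lower label)) = g3
    generalize ["rust", "corrosion", "metal"].any
        (fun k => PySem.Str.isIn k (PySem.Str.lower label)) = g4
    generalize ["boat", "ship", "hull"].any
        (fun k => PySem.Str.isIn k (PySem.Str.lower label)) = g5
    revert g1 g2 g3 g4 g5
    decide
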